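-- pv_equiv track=rewrite | github.com/rahulbakshee/cp | LeetCode/lc1427-Perform String Shifts.py | stringShift
-- ===== SOURCE A (Python) =====
-- from typing import List
--
-- def stringShift(s: str, shift: List[List[int]]) -> str:
--     left,right = 0, 0
--     for direction, amount in shift:
--         # left
--         if direction == 0:
--             left += amount
--         # right
--         else:
--             right += amount
--
--     left = left % len(s)
--     right = right % len(s)
--
--     # check which is higher and perform shift
--     if left > right:
--         k = left-right
--         s = s[k:] + s[:k]
--     elif right > left:
--         k = right-left
--         s = s[-k:] + s[:-k]
--     return s
-- ===== SOURCE B (Python) =====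
-- from typing import List
--
-- def stringShift(s: str, shift: List[List[int]]) -> str:
--     n = len(s)
--     k = (sum(a for d, a in shift if d == 0) - sum(a for d, a in shift if d != 0)) % n
--     return ''.join(s[(i + k) % n] for i in range(n))
-- ===== Notes on version B (the rewrite author's own statement) =====
-- stated objective: alternative
-- what changed: B computes the net shift with two staged sum() passes and builds the output character by character as s[(i+k)%n] over range(n), instead of A's accumulator loop, per-sign modulo, three-way branch and slice concatenation.
import Mathlib
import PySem

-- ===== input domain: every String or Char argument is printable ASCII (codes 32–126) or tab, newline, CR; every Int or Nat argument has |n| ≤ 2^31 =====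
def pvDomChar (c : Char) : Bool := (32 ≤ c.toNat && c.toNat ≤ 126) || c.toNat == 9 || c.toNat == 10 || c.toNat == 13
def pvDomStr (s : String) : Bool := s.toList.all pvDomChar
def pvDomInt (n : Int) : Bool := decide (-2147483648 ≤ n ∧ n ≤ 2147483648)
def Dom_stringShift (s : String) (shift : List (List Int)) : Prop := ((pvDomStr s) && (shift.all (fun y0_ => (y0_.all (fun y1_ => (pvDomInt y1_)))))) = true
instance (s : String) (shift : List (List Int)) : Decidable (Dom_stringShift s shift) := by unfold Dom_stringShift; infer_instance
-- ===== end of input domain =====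

-- B replaces A's accumulator loop, per-sign modulo, three-way branch and slice rotation by two
-- staged sum passes and a per-index construction s[(i+k)%n] of the output (objective: alternative).


-- ===== PORT A =====
-- step of A's loop: unpack [direction, amount], add to the matching accumulator
def stringShiftStepA (lr : Int × Int) (p : List Int) : Int × Int :=
  match p with
  | [direction, amount] =>
      if direction == 0 then (lr.1 + amount, lr.2) else (lr.1, lr.2 + amount)
  | _ => lr

-- Port of A: two accumulators (left,right), per-sign modulo, three-way comparison, two slice forms.
def stringShift (s : String) (shift : List (List Int)) : String :=
  let lr := shift.foldl stringShiftStepA (0, 0)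
  let cs := s.toList
  let left := PySem.Int.mod lr.1 (cs.length : Int)
  let right := PySem.Int.mod lr.2 (cs.length : Int)
  if left > right then
    let k := left - right
    String.ofList (PySem.List.slice cs (some k) none ++ PySem.List.slice cs none (some k))
  else if right > left then
    let k := right - left
    String.ofList (PySem.List.slice cs (some (-k)) none ++ PySem.List.slice cs none (some (-k)))
  else s

-- ===== PORT B =====
-- sum(a for d, a in shift if d == 0)
def stringShiftLeftSum (shift : List (List Int)) : Int :=
  shift.foldl (fun acc p => match p with
    | [d, a] => if d == 0 then acc + a else acc
    | _ => acc) 0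

-- sum(a for d, a in shift if d != 0)
def stringShiftRightSum (shift : List (List Int)) : Int :=
  shift.foldl (fun acc p => match p with
    | [d, a] => if d != 0 then acc + a else acc
    | _ => acc) 0

-- Port of B: two staged sum passes, then the output built character by character as s[(i+k)%n].
-- (pyGetD's default ' ' is never consulted: for 0 < n the index (i+k)%n is always in range.)
def stringShift_alt (s : String) (shift : List (List Int)) : String :=
  let cs := s.toList
  let n := (cs.length : Int)
  let k := PySem.Int.mod (stringShiftLeftSum shift - stringShiftRightSum shift) n
  String.ofList ((PySem.List.pyRange 0 n 1).map
    (fun i => PySem.List.pyGetD cs (PySem.Int.mod (i + k) n) ' '))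

-- ===== PRECONDITION & SPEC =====
-- Pre_ excludes the empty string, on which A raises ZeroDivisionError (len(s) is the modulus),
-- and shift entries that are not 2-element lists, on which A's tuple unpacking raises ValueError.
def Pre_stringShift (s : String) (shift : List (List Int)) : Prop :=
  s.toList ≠ [] ∧ ∀ p ∈ shift, p.length = 2
instance (s : String) (shift : List (List Int)) : Decidable (Pre_stringShift s shift) := by
  unfold Pre_stringShift; infer_instance
def pvWitness_stringShift : String × List (List Int) := ("abc", [[0, 1], [1, 2]])
def Spec_stringShift (s : String) (shift : List (List Int)) (out : String) : Prop := out = stringShift_alt s shift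
instance (s : String) (shift : List (List Int)) (out : String) : Decidable (Spec_stringShift s shift out) := by unfold Spec_stringShift; infer_instance

-- ===== CLAIM (what is proved, stated in full; the proofs are below) =====
def Claim_equal_stringShift : Prop := ∀ (s : String) (shift : List (List Int)), Dom_stringShift s shift → Pre_stringShift s shift → Spec_stringShift s shift (stringShift s shift)

-- ===== LEMMAS AND PROOFS =====

-- per-entry contributions of a shift entry to the two staged sums
def stringShiftGL (p : List Int) : Int :=
  match p with | [d, a] => if d == 0 then a else 0 | _ => 0

def stringShiftGR (p : List Int) : Int :=
  match p with | [d, a] => if d != 0 then a else 0 | _ => 0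

lemma stringShift_leftSum_eq (shift : List (List Int)) :
    stringShiftLeftSum shift = (shift.map stringShiftGL).sum := by
  unfold stringShiftLeftSum
  have h : (fun (acc : Int) (p : List Int) => match p with
      | [d, a] => if d == 0 then acc + a else acc
      | _ => acc) = fun acc p => acc + stringShiftGL p := by
    funext acc p
    rcases p with _ | ⟨d, _ | ⟨a, _ | ⟨x, rest⟩⟩⟩ <;> first
      | (simp [stringShiftGL]; split_ifs <;> simp)
      | simp [stringShiftGL]
  rw [h, PySem.List.foldl_add]
  simp

lemma stringShift_rightSum_eq (shift : List (List Int)) :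
    stringShiftRightSum shift = (shift.map stringShiftGR).sum := by
  unfold stringShiftRightSum
  have h : (fun (acc : Int) (p : List Int) => match p with
      | [d, a] => if d != 0 then acc + a else acc
      | _ => acc) = fun acc p => acc + stringShiftGR p := by
    funext acc p
    rcases p with _ | ⟨d, _ | ⟨a, _ | ⟨x, rest⟩⟩⟩ <;> first
      | (simp [stringShiftGR]; split_ifs <;> simp)
      | simp [stringShiftGR]
  rw [h, PySem.List.foldl_add]
  simp

-- A's paired fold computes exactly B's two staged sums.
lemma stringShift_fold_split (shift : List (List Int)) : ∀ (l r : Int),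
    shift.foldl stringShiftStepA (l, r)
      = (l + (shift.map stringShiftGL).sum, r + (shift.map stringShiftGR).sum) := by
  induction shift with
  | nil => intro l r; simp [List.foldl]
  | cons p tl ih =>
      intro l r
      rcases p with _ | ⟨d, _ | ⟨a, _ | ⟨x, rest⟩⟩⟩
      · simp [List.foldl, stringShiftStepA, stringShiftGL, stringShiftGR, ih]
      · simp [List.foldl, stringShiftStepA, stringShiftGL, stringShiftGR, ih]
      · by_cases hd : d = 0
        · simp [List.foldl, stringShiftStepA, stringShiftGL, stringShiftGR, hd, ih, Prod.ext_iff]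
          ring
        · simp [List.foldl, stringShiftStepA, stringShiftGL, stringShiftGR, hd, ih, Prod.ext_iff]
          ring
      · simp [List.foldl, stringShiftStepA, stringShiftGL, stringShiftGR, ih]

-- rotation as an index map: for kt < n, [cs[(i+kt) % n] for i in range(n)] = cs[kt:] + cs[:kt]
lemma stringShift_rot_map (cs : List Char) (kt : Nat) (hk : kt < cs.length) :
    (List.range cs.length).map (fun j => cs.getD ((j + kt) % cs.length) ' ')
      = cs.drop kt ++ cs.take kt := by
  have hm : 0 < cs.length := Nat.lt_of_le_of_lt (Nat.zero_le _) hk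
  apply List.ext_getElem
  · simp; omega
  · intro i h1 h2
    simp only [List.getElem_map, List.getElem_range]
    have hmod : (i + kt) % cs.length < cs.length := Nat.mod_lt _ hm
    rw [List.getD_eq_getElem _ _ hmod]
    simp only [List.length_map, List.length_range] at h1
    by_cases hc : i + kt < cs.length
    · rw [List.getElem_append_left (by simp; omega), List.getElem_drop]
      congr 1
      rw [Nat.mod_eq_of_lt hc]; omega
    · rw [List.getElem_append_right (by simp; omega), List.getElem_take]
      congr 1
      rw [Nat.mod_eq_sub_mod (by omega), Nat.mod_eq_of_lt (by omega)]
      simp; omega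

-- core equality under the precondition
lemma stringShift_eq (s : String) (shift : List (List Int))
    (hne : s.toList ≠ []) : stringShift s shift = stringShift_alt s shift := by
  simp only [stringShift, stringShift_alt]
  have hfold : shift.foldl stringShiftStepA (0, 0)
      = (stringShiftLeftSum shift, stringShiftRightSum shift) := by
    rw [stringShift_fold_split shift 0 0, stringShift_leftSum_eq, stringShift_rightSum_eq]
    simp
  rw [hfold]
  set L := stringShiftLeftSum shift with hLd
  set R := stringShiftRightSum shift with hRd
  set cs := s.toList with hcs
  have hmpos : 0 < cs.length := List.length_pos_of_ne_nil hne
  have hn : 0 < (cs.length : Int) := by exact_mod_cast hmpos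
  set n : Int := (cs.length : Int) with hnd
  have hmodL : PySem.Int.mod L n = L % n := PySem.Int.mod_eq_emod_of_pos hn
  have hmodR : PySem.Int.mod R n = R % n := PySem.Int.mod_eq_emod_of_pos hn
  have hmodN : PySem.Int.mod (L - R) n = (L - R) % n := PySem.Int.mod_eq_emod_of_pos hn
  have hsub : (L - R) % n = (L % n - R % n) % n := by rw [Int.sub_emod]
  have hLb : 0 ≤ L % n ∧ L % n < n := ⟨Int.emod_nonneg _ (by omega), Int.emod_lt_of_pos _ hn⟩
  have hRb : 0 ≤ R % n ∧ R % n < n := ⟨Int.emod_nonneg _ (by omega), Int.emod_lt_of_pos _ hn⟩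
  -- normalize B's output to drop/take of kt = ((L-R) % n).toNat
  obtain ⟨k, hkd⟩ : ∃ k : Int, (L - R) % n = k := ⟨_, rfl⟩
  rw [hkd] at hsub hmodN
  have hk0 : 0 ≤ k := hkd ▸ Int.emod_nonneg _ (by omega)
  have hk1 : k < n := hkd ▸ Int.emod_lt_of_pos _ hn
  set kt : Nat := k.toNat with hktd
  have hktn : kt < cs.length := by omega
  have hB : (PySem.List.pyRange 0 n 1).map
        (fun i => PySem.List.pyGetD cs (PySem.Int.mod (i + PySem.Int.mod (L - R) n) n) ' ')
      = cs.drop kt ++ cs.take kt := by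
    rw [hnd, PySem.List.pyRange_zero_natCast cs.length, List.map_map]
    rw [← stringShift_rot_map cs kt hktn]
    apply List.map_congr_left
    intro j hj
    simp only [Function.comp]
    rw [hmodN, show (j : Int) + k = ((j + kt : Nat) : Int) by omega,
        PySem.Int.mod_natCast, PySem.List.pyGetD_natCast]
  rw [hmodL, hmodR, hB]
  by_cases hgt : L % n > R % n
  · have hk : k = L % n - R % n := by
      rw [hsub]; exact Int.emod_eq_of_lt (by omega) (by omega)
    simp only [if_pos hgt]
    rw [PySem.List.slice_from _ (by omega), PySem.List.slice_to _ (by omega)]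
    have : (L % n - R % n).toNat = kt := by omega
    rw [this]
  · by_cases hlt : R % n > L % n
    · have hk : k = n - (R % n - L % n) := by
        rw [hsub]
        have h1 : (L % n - R % n) % n = (L % n - R % n + n) % n := by
          rw [Int.add_emod_right]
        rw [h1, Int.emod_eq_of_lt (by omega) (by omega)]; ring
      simp only [if_neg (by omega : ¬ L % n > R % n), if_pos hlt]
      set q : Int := R % n - L % n with hqd
      have hq1 : 0 < q := by omega
      have hq2 : q < n := by omega
      have hqnat : -q = -((q.toNat : Nat) : Int) := by omega
      rw [hqnat, PySem.List.slice_from_neg_natCast _ _ (by omega),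
          PySem.List.slice_to_neg_natCast _ _ (by omega)]
      have : cs.length - q.toNat = kt := by omega
      rw [this]
    · have heq : L % n = R % n := by omega
      have hk : k = 0 := by rw [hsub, heq]; simp
      have hkt0 : kt = 0 := by omega
      simp only [if_neg (by omega : ¬ L % n > R % n), if_neg (by omega : ¬ R % n > L % n)]
      rw [hkt0]
      simp [hcs]

-- ===== VERDICT (by name: the statement is the Claim_ definition above) =====
theorem stringShift_spec : Claim_equal_stringShift := by
  intro s shift _ hpre
  unfold Spec_stringShift
  exact stringShift_eq s shift hpre.1
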